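-- pv_equiv track=rewrite | github.com/JIE77777/Wagstaff-Lab | core/lua/scan.py | _long_bracket_level
-- ===== SOURCE A (Python) =====
-- from typing import List, Optional
--
-- def _long_bracket_level(text: str, i: int) -> Optional[int]:
--     """
--     If text[i:] starts a Lua long-bracket opener: [=*[ , return '=' count; else None.
--     Examples: [[ -> 0, [=[ -> 1, [==[ -> 2
--     """
--     n = len(text)
--     if i >= n or text[i] != "[":
--         return None
--     j = i + 1
--     while j < n and text[j] == "=":
--         j += 1
--     if j < n and text[j] == "[":
--         return j - i - 1
--     return None
-- ===== SOURCE B (Python) =====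
-- def _long_bracket_level(text, i):
--     """Idiomatic rewrite: inspect the suffix text[i:] with slicing/startswith/lstrip
--     instead of index-by-index scanning."""
--     s = text[i:]
--     if s.startswith('['):
--         rest = s[1:].lstrip('=')
--         if rest.startswith('['):
--             return len(s) - len(rest) - 1
--     return None
-- ===== Notes on version B (the rewrite author's own statement) =====
-- stated objective: idiomatic
-- what changed: Replaces the hand-written index-by-index scan (bounds checks, explicit cursor j) with the idiomatic suffix formulation: slice text[i:], startswith('['), lstrip('=') and a length difference.
-- intended difference: On negative i whose suffix text[i:] is '[' followed only by '=' to the end of the string, A's scan wraps past the end back to index 0 and, when the text's leading '='-run is followed by '[', returns that spurious level (e.g. A('[=[', -1) = 0), while B returns None — the intended value, since the suffix has no closing '['. — e.g. on _long_bracket_level("[=[", -1): A returns some 0, B returns none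
import Mathlib
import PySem

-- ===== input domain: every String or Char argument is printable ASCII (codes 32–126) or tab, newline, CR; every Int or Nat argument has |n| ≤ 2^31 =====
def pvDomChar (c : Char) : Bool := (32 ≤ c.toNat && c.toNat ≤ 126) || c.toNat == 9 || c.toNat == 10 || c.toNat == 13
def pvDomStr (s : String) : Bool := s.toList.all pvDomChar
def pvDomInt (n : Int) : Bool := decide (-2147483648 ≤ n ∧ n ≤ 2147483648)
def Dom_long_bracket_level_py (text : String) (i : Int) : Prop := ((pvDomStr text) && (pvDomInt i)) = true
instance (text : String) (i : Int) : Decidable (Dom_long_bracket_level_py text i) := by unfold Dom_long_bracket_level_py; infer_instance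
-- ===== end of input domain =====

-- B rewrites A's hand-rolled index scan idiomatically over the suffix text[i:] (slice +
-- startswith + lstrip); equivalence is proved outside D_, where A's negative-index scan
-- wraps past the end of the string and reports a bogus opener.

-- ===== PORT A =====
-- the 'while j < n and text[j] == "=": j += 1' loop of A; returns the final j
def lblScanA (cs : List Char) (n : Int) (j : Int) : Int :=
  if h : j < n ∧ PySem.List.pyGet? cs j = some '=' then lblScanA cs n (j + 1) else j
termination_by (n - j).toNat
decreasing_by obtain ⟨h1, _⟩ := h; omega

def long_bracket_level_py (text : String) (i : Int) : Option Int :=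
  let cs := text.toList
  let n : Int := cs.length
  if i ≥ n then none
  else if PySem.List.pyGet? cs i ≠ some '[' then none   -- pyGet? = none ⇒ IndexError (outside Pre_)
  else
    let j := lblScanA cs n (i + 1)
    if j < n ∧ PySem.List.pyGet? cs j = some '[' then some (j - i - 1) else none

-- ===== PORT B =====
def long_bracket_level_py_alt (text : String) (i : Int) : Option Int :=
  let s := PySem.List.slice text.toList (some i) none          -- s = text[i:]
  if PySem.Chars.startswith s ['['] then
    let rest := (s.drop 1).dropWhile (· == '=')                -- s[1:].lstrip('='), ported by hand (exact: lstrip with a char set drops leading '=')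
    if PySem.Chars.startswith rest ['['] then
      some ((s.length : Int) - (rest.length : Int) - 1)        -- len(s) - len(rest) - 1
    else none
  else none

-- ===== PRECONDITION & SPEC =====
-- Pre_ excludes exactly the inputs where A raises IndexError: i < -len(text)
-- (there B slices text[i:] = text and returns the level of the whole string).
def Pre_long_bracket_level_py (text : String) (i : Int) : Prop :=
  -(text.toList.length : Int) ≤ i
instance (text : String) (i : Int) : Decidable (Pre_long_bracket_level_py text i) := by
  unfold Pre_long_bracket_level_py; infer_instance

def pvWitness_long_bracket_level_py : String × Int := ("[==[", 0)

-- On negative i whose suffix text[i:] is '[' followed only by '=' up to the end of the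
-- string, A's scan wraps around to index 0 and, when the text's leading '='-run is
-- followed by '[', A returns that spurious level, while B returns None — the intended
-- answer, since the suffix contains no closing '['.
def D_long_bracket_level_py (text : String) (i : Int) : Prop :=
  let cs := text.toList
  let n : Int := cs.length
  i < 0 ∧ -n ≤ i ∧
  cs[(n + i).toNat]? = some '[' ∧
  ((cs.drop ((n + i).toNat + 1)).all (· == '=')) = true ∧
  (cs.dropWhile (· == '=')).head? = some '['
instance (text : String) (i : Int) : Decidable (D_long_bracket_level_py text i) := by
  unfold D_long_bracket_level_py; infer_instance

def Spec_long_bracket_level_py (text : String) (i : Int) (out : Option Int) : Prop :=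
  ¬ D_long_bracket_level_py text i → out = long_bracket_level_py_alt text i
instance (text : String) (i : Int) (out : Option Int) : Decidable (Spec_long_bracket_level_py text i out) := by
  unfold Spec_long_bracket_level_py; infer_instance

def pvDiffWitness_long_bracket_level_py : String × Int := ("[=[", -1)
def pvDiffWitnessOut_long_bracket_level_py : (Option Int) × (Option Int) := (some 0, none)

-- ===== CLAIM (what is proved, stated in full; the proofs are below) =====
def Claim_unchanged_long_bracket_level_py : Prop := ∀ (text : String) (i : Int), Dom_long_bracket_level_py text i → Pre_long_bracket_level_py text i → Spec_long_bracket_level_py text i (long_bracket_level_py text i)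
def Claim_changed_long_bracket_level_py : Prop := Dom_long_bracket_level_py (pvDiffWitness_long_bracket_level_py.1) (pvDiffWitness_long_bracket_level_py.2) ∧ Pre_long_bracket_level_py (pvDiffWitness_long_bracket_level_py.1) (pvDiffWitness_long_bracket_level_py.2) ∧ D_long_bracket_level_py (pvDiffWitness_long_bracket_level_py.1) (pvDiffWitness_long_bracket_level_py.2) ∧ long_bracket_level_py (pvDiffWitness_long_bracket_level_py.1) (pvDiffWitness_long_bracket_level_py.2) = pvDiffWitnessOut_long_bracket_level_py.1 ∧ long_bracket_level_py_alt (pvDiffWitness_long_bracket_level_py.1) (pvDiffWitness_long_bracket_level_py.2) = pvDiffWitnessOut_long_bracket_level_py.2 ∧ pvDiffWitnessOut_long_bracket_level_py.1 ≠ pvDiffWitnessOut_long_bracket_level_py.2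
def Claim_exact_long_bracket_level_py : Prop := ∀ (text : String) (i : Int), Dom_long_bracket_level_py text i → Pre_long_bracket_level_py text i → D_long_bracket_level_py text i → long_bracket_level_py text i ≠ long_bracket_level_py_alt text i

-- ===== LEMMAS AND PROOFS =====

theorem dropWhile_eq_drop_tw (p : Char → Bool) : ∀ (l : List Char), l.dropWhile p = l.drop (l.takeWhile p).length := by
  intro l
  induction l with
  | nil => simp
  | cons a l ih => by_cases h : p a <;> simp [List.takeWhile_cons, h, ih]

theorem startswith_single (l : List Char) (c : Char) :
    PySem.Chars.startswith l [c] = true ↔ l.head? = some c := by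
  rw [PySem.Chars.startswith_iff]
  cases l with
  | nil => simp
  | cons a t => simp [List.cons_prefix_cons, eq_comm]

theorem tw_len_le (p : Char → Bool) (l : List Char) : (l.takeWhile p).length ≤ l.length :=
  (List.takeWhile_prefix p).length_le

theorem lblScanA_nonneg (k : Nat) : ∀ (cs : List Char) (a : Nat), cs.length - a ≤ k →
    lblScanA cs (cs.length : Int) (a : Int)
      = (a : Int) + (((cs.drop a).takeWhile (· == '=')).length : Int) := by
  induction k with
  | zero =>
    intro cs a h
    rw [lblScanA, dif_neg (by push_cast; omega)]
    rw [List.drop_eq_nil_of_le (by omega)]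
    simp
  | succ k ih =>
    intro cs a h
    by_cases hlt : a < cs.length
    · have hdrop : cs.drop a = cs[a] :: cs.drop (a + 1) := List.drop_eq_getElem_cons hlt
      have hget : PySem.List.pyGet? cs (a : Int) = some cs[a] := by
        rw [PySem.List.pyGet?_natCast, List.getElem?_eq_getElem hlt]
      by_cases he : cs[a] = '='
      · rw [lblScanA, dif_pos ⟨by push_cast; omega, by rw [hget, he]⟩]
        have hcast : ((a : Int) + 1) = ((a + 1 : Nat) : Int) := by push_cast; ring
        rw [hcast, ih cs (a + 1) (by omega), hdrop]
        simp [he]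
        push_cast; ring
      · rw [lblScanA, dif_neg (by rw [hget]; simp [he])]
        rw [hdrop]
        simp [he]
    · rw [lblScanA, dif_neg (by push_cast; omega)]
      rw [List.drop_eq_nil_of_le (by omega)]
      simp

theorem lblScanA_neg (m : Nat) : ∀ (cs : List Char) (j : Int), j = -(m : Int) → 0 < m → m ≤ cs.length →
    lblScanA cs (cs.length : Int) j
      = (if (cs.length - m) + ((cs.drop (cs.length - m)).takeWhile (· == '=')).length = cs.length
         then lblScanA cs (cs.length : Int) 0
         else j + (((cs.drop (cs.length - m)).takeWhile (· == '=')).length : Int)) := by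
  induction m with
  | zero => intro cs j hj h0 hle; omega
  | succ m ih =>
    intro cs j hj h0 hle
    have hlt : cs.length - (m + 1) < cs.length := by omega
    have hdrop : cs.drop (cs.length - (m + 1)) = cs[cs.length - (m + 1)] :: cs.drop (cs.length - (m + 1) + 1) :=
      List.drop_eq_getElem_cons hlt
    have hget : PySem.List.pyGet? cs j = some cs[cs.length - (m + 1)] := by
      rw [hj, PySem.List.pyGet?_neg_natCast cs (m + 1) (by omega) (by omega), List.getElem?_eq_getElem hlt]
    by_cases he : cs[cs.length - (m + 1)] = '='
    · rw [lblScanA, dif_pos ⟨by omega, by rw [hget, he]⟩]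
      have hd2 : cs.length - (m + 1) + 1 = cs.length - m := by omega
      have ht : (cs.drop (cs.length - (m + 1))).takeWhile (· == '=')
          = '=' :: (cs.drop (cs.length - m)).takeWhile (· == '=') := by
        rw [hdrop, hd2, he]; simp
      by_cases hm : m = 0
      · subst hm
        have hj0 : j + 1 = 0 := by omega
        have ht0 : (cs.drop (cs.length - 0)).takeWhile (· == '=') = [] := by
          simp [List.drop_length]
        rw [hj0, ht, if_pos (by rw [ht0] at ht ⊢; simp at ht ⊢; omega)]
      · have hstep : j + 1 = -((m : Nat) : Int) := by omega
        rw [ih cs (j + 1) hstep (by omega) (by omega), ht]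
        by_cases hc : (cs.length - m) + ((cs.drop (cs.length - m)).takeWhile (· == '=')).length = cs.length
        · rw [if_pos hc, if_pos (by simp; omega)]
        · rw [if_neg hc, if_neg (by simp; omega)]
          simp; omega
    · rw [lblScanA, dif_neg (by rw [hget]; simp [he])]
      have ht : (cs.drop (cs.length - (m + 1))).takeWhile (· == '=') = [] := by
        rw [hdrop]; simp [he]
      rw [ht, if_neg (by simp; omega)]
      simp

-- B on a suffix starting at a nonnegative position p < length, via the drop form
theorem B_drop (text : String) (i : Int) (p t : Nat)
    (hs : PySem.List.slice text.toList (some i) none = text.toList.drop p)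
    (hp : p < text.toList.length)
    (ht : t = ((text.toList.drop (p + 1)).takeWhile (· == '=')).length) :
    long_bracket_level_py_alt text i =
      (if text.toList[p] = '[' then
         (if text.toList[p + 1 + t]? = some '[' then
           some ((text.toList.length : Int) - p - ((text.toList.length - (p + 1 + t) : Nat) : Int) - 1)
         else none)
       else none) := by
  have hdrop : text.toList.drop p = text.toList[p] :: text.toList.drop (p + 1) :=
    List.drop_eq_getElem_cons hp
  simp only [long_bracket_level_py_alt, hs]
  by_cases hc : text.toList[p] = '['
  · rw [if_pos hc]
    have hsw : PySem.Chars.startswith (text.toList.drop p) ['['] = true := by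
      rw [startswith_single, List.head?_drop, List.getElem?_eq_getElem hp, hc]
    rw [hsw]
    simp only [if_true]
    have hrest : ((text.toList.drop p).drop 1).dropWhile (· == '=')
        = text.toList.drop (p + 1 + t) := by
      rw [hdrop]
      simp only [List.drop_succ_cons, List.drop_zero]
      rw [dropWhile_eq_drop_tw, List.drop_drop, ht]
    rw [hrest]
    by_cases hh : text.toList[p + 1 + t]? = some '['
    · rw [if_pos hh]
      have hsw2 : PySem.Chars.startswith (text.toList.drop (p + 1 + t)) ['['] = true := by
        rw [startswith_single, List.head?_drop, hh]
      rw [hsw2]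
      simp only [if_true, List.length_drop, Option.some.injEq]
      omega
    · rw [if_neg hh]
      have hsw2 : PySem.Chars.startswith (text.toList.drop (p + 1 + t)) ['['] = false := by
        rw [Bool.eq_false_iff]
        intro hT
        rw [startswith_single, List.head?_drop] at hT
        exact hh hT
      rw [hsw2]
      simp
  · rw [if_neg hc]
    have hsw : PySem.Chars.startswith (text.toList.drop p) ['['] = false := by
      rw [Bool.eq_false_iff]
      intro hT
      rw [startswith_single, List.head?_drop, List.getElem?_eq_getElem hp] at hT
      exact hc (by injection hT)
    rw [hsw]
    simp

theorem all_iff_tw (p : Char → Bool) (l : List Char) :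
    l.all p = true ↔ (l.takeWhile p).length = l.length := by
  constructor
  · intro h
    rw [List.takeWhile_eq_self_iff.mpr (by simpa [List.all_eq_true] using h)]
  · intro h
    have := (List.takeWhile_prefix p (l := l)).eq_of_length h
    rw [List.all_eq_true]
    exact List.takeWhile_eq_self_iff.mp this

theorem A_nonneg (text : String) (i : Int) (p t : Nat)
    (hp : p < text.toList.length) (hi : i = (p : Int))
    (ht : t = ((text.toList.drop (p + 1)).takeWhile (· == '=')).length) :
    long_bracket_level_py text i =
      (if text.toList[p] = '[' then
         (if text.toList[p + 1 + t]? = some '[' then some (t : Int) else none)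
       else none) := by
  have hget : PySem.List.pyGet? text.toList i = some text.toList[p] := by
    rw [hi, PySem.List.pyGet?_natCast, List.getElem?_eq_getElem hp]
  simp only [long_bracket_level_py]
  rw [if_neg (by omega)]
  by_cases hc : text.toList[p] = '['
  · rw [if_pos hc, if_neg (by rw [hget, hc]; simp)]
    have hj : lblScanA text.toList (text.toList.length : Int) (i + 1)
        = ((p + 1 + t : Nat) : Int) := by
      have : i + 1 = ((p + 1 : Nat) : Int) := by omega
      rw [this, lblScanA_nonneg text.toList.length text.toList (p + 1) (by omega), ht]
      push_cast; ring
    rw [hj]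
    by_cases hh : text.toList[p + 1 + t]? = some '['
    · have hlt2 : p + 1 + t < text.toList.length := by
        by_contra hge
        rw [List.getElem?_eq_none (by omega)] at hh
        simp at hh
      rw [if_pos ⟨by omega, by rw [PySem.List.pyGet?_natCast]; exact hh⟩, if_pos hh]
      congr 1
      omega
    · rw [if_neg (by
        rintro ⟨hlt2, hg⟩
        rw [PySem.List.pyGet?_natCast] at hg
        exact hh hg), if_neg hh]
  · rw [if_neg hc, if_pos (by rw [hget]; simp [hc])]

theorem A_wrap (text : String) (i : Int) (k : Nat)
    (hk1 : 1 ≤ k) (hk2 : k ≤ text.toList.length) (hi : i = -(k : Int))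
    (hbr : text.toList[text.toList.length - k]'(by omega) = '[')
    (h4 : (text.toList.length - k) + 1 + ((text.toList.drop (text.toList.length - k + 1)).takeWhile (· == '=')).length = text.toList.length) :
    long_bracket_level_py text i =
      (if text.toList[(text.toList.takeWhile (· == '=')).length]? = some '[' then
         some (((text.toList.takeWhile (· == '=')).length : Int) - i - 1)
       else none) := by
  have hN : 1 ≤ text.toList.length := by omega
  have hget : PySem.List.pyGet? text.toList i = some '[' := by
    rw [hi, PySem.List.pyGet?_neg_natCast text.toList k (by omega) hk2,
      List.getElem?_eq_getElem (by omega), hbr]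
  simp only [long_bracket_level_py]
  rw [if_neg (by omega), if_neg (by rw [hget]; simp)]
  have hj : lblScanA text.toList (text.toList.length : Int) (i + 1)
      = ((text.toList.takeWhile (· == '=')).length : Int) := by
    have h0 : lblScanA text.toList (text.toList.length : Int) ((0 : Nat) : Int)
        = ((text.toList.takeWhile (· == '=')).length : Int) := by
      rw [lblScanA_nonneg text.toList.length text.toList 0 (by omega)]
      simp
    by_cases hk : k = 1
    · have : i + 1 = ((0 : Nat) : Int) := by omega
      rw [this, h0]
    · have hstep : i + 1 = -(((k - 1 : Nat) : Nat) : Int) := by omega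
      rw [lblScanA_neg (k - 1) text.toList (i + 1) hstep (by omega) (by omega)]
      have harith : text.toList.length - (k - 1) = text.toList.length - k + 1 := by omega
      rw [harith, if_pos (by omega)]
      exact_mod_cast h0
  rw [hj]
  by_cases hh : text.toList[(text.toList.takeWhile (· == '=')).length]? = some '['
  · have hlt2 : (text.toList.takeWhile (· == '=')).length < text.toList.length := by
      by_contra hge
      rw [List.getElem?_eq_none (by omega)] at hh
      simp at hh
    rw [if_pos ⟨by omega, by rw [PySem.List.pyGet?_natCast]; exact hh⟩, if_pos hh]
  · rw [if_neg (by
      rintro ⟨hlt2, hg⟩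
      rw [PySem.List.pyGet?_natCast] at hg
      exact hh hg), if_neg hh]

theorem A_neg_nowrap (text : String) (i : Int) (k t1 : Nat)
    (hk2 : k ≤ text.toList.length) (hk1 : 1 ≤ k) (hi : i = -(k : Int))
    (hbr : text.toList[text.toList.length - k]'(by omega) = '[')
    (ht : t1 = ((text.toList.drop (text.toList.length - k + 1)).takeWhile (· == '=')).length)
    (hnw : (text.toList.length - k) + 1 + t1 < text.toList.length) :
    long_bracket_level_py text i =
      (if text.toList[(text.toList.length - k) + 1 + t1]? = some '[' then some (t1 : Int) else none) := by
  have hk1' : 2 ≤ k := by omega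
  have hget : PySem.List.pyGet? text.toList i = some '[' := by
    rw [hi, PySem.List.pyGet?_neg_natCast text.toList k (by omega) hk2,
      List.getElem?_eq_getElem (by omega), hbr]
  simp only [long_bracket_level_py]
  rw [if_neg (by omega), if_neg (by rw [hget]; simp)]
  have hstep : i + 1 = -(((k - 1 : Nat)) : Int) := by omega
  have hj : lblScanA text.toList (text.toList.length : Int) (i + 1) = (i + 1) + (t1 : Int) := by
    rw [lblScanA_neg (k - 1) text.toList (i + 1) hstep (by omega) (by omega)]
    have harith : text.toList.length - (k - 1) = text.toList.length - k + 1 := by omega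
    rw [harith, if_neg (by omega), ht]
  rw [hj]
  have hjneg : (i + 1) + (t1 : Int) = -(((k - 1 - t1 : Nat)) : Int) := by
    have : t1 < k - 1 := by omega
    push_cast
    omega
  have hgj : PySem.List.pyGet? text.toList ((i + 1) + (t1 : Int))
      = text.toList[(text.toList.length - k) + 1 + t1]? := by
    rw [hjneg, PySem.List.pyGet?_neg_natCast text.toList (k - 1 - t1) (by omega) (by omega)]
    congr 1
    omega
  by_cases hh : text.toList[(text.toList.length - k) + 1 + t1]? = some '['
  · rw [if_pos ⟨by omega, by rw [hgj]; exact hh⟩, if_pos hh]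
    congr 1
    ring
  · rw [if_neg (by rintro ⟨_, hg⟩; rw [hgj] at hg; exact hh hg), if_neg hh]

theorem cond5_iff (cs : List Char) :
    (cs.dropWhile (· == '=')).head? = some '[' ↔ cs[(cs.takeWhile (· == '=')).length]? = some '[' := by
  rw [dropWhile_eq_drop_tw, List.head?_drop]

theorem main_unchanged (text : String) (i : Int)
    (hPre : -(text.toList.length : Int) ≤ i) (hD : ¬ D_long_bracket_level_py text i) :
    long_bracket_level_py text i = long_bracket_level_py_alt text i := by
  by_cases h1 : (text.toList.length : Int) ≤ i
  · have hA : long_bracket_level_py text i = none := by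
      simp only [long_bracket_level_py]
      rw [if_pos (by omega)]
    have hs : PySem.List.slice text.toList (some i) none = [] := by
      rw [PySem.List.slice_from text.toList (by omega)]
      exact List.drop_eq_nil_of_le (by omega)
    have hB : long_bracket_level_py_alt text i = none := by
      simp only [long_bracket_level_py_alt, hs]
      rw [show PySem.Chars.startswith ([] : List Char) ['['] = false from by decide]
      simp
    rw [hA, hB]
  · by_cases h2 : 0 ≤ i
    · -- 0 ≤ i < n
      have hp : i.toNat < text.toList.length := by omega
      have hi : i = ((i.toNat : Nat) : Int) := by omega
      have hs : PySem.List.slice text.toList (some i) none = text.toList.drop i.toNat :=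
        PySem.List.slice_from text.toList h2
      rw [A_nonneg text i i.toNat _ hp hi rfl, B_drop text i i.toNat _ hs hp rfl]
      by_cases hc : text.toList[i.toNat] = '['
      · rw [if_pos hc, if_pos hc]
        set t := ((text.toList.drop (i.toNat + 1)).takeWhile (· == '=')).length with htdef
        by_cases hh : text.toList[i.toNat + 1 + t]? = some '['
        · rw [if_pos hh, if_pos hh]
          have hlt2 : i.toNat + 1 + t < text.toList.length := by
            by_contra hge
            rw [List.getElem?_eq_none (by omega)] at hh
            simp at hh
          simp only [Option.some.injEq]
          omega
        · rw [if_neg hh, if_neg hh]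
      · rw [if_neg hc, if_neg hc]
    · -- -n ≤ i < 0
      have hk1 : 1 ≤ (-i).toNat := by omega
      have hk2 : (-i).toNat ≤ text.toList.length := by omega
      have hi : i = -(((-i).toNat : Nat) : Int) := by omega
      have hp : text.toList.length - (-i).toNat < text.toList.length := by omega
      have hs : PySem.List.slice text.toList (some i) none
          = text.toList.drop (text.toList.length - (-i).toNat) := by
        have hs' := PySem.List.slice_from_neg_natCast text.toList (-i).toNat (by omega)
        rw [← hi] at hs'
        exact hs'
      set p := text.toList.length - (-i).toNat with hpdef
      set t1 := ((text.toList.drop (p + 1)).takeWhile (· == '=')).length with ht1def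
      rw [B_drop text i p t1 hs hp rfl]
      by_cases hbr : text.toList[p] = '['
      · by_cases h4 : p + 1 + t1 = text.toList.length
        · -- wrap case
          rw [if_pos hbr, if_neg (by rw [List.getElem?_eq_none (by omega)]; simp)]
          rw [A_wrap text i (-i).toNat hk1 hk2 hi hbr (by omega)]
          have hc5 : ¬ (text.toList[(text.toList.takeWhile (· == '=')).length]? = some '[') := by
            intro hcond
            apply hD
            have hptn : ((text.toList.length : Int) + i).toNat = p := by omega
            refine ⟨by omega, hPre, ?_, ?_, ?_⟩
            · rw [hptn, List.getElem?_eq_getElem hp, hbr]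
            · rw [hptn, all_iff_tw]
              simp only [List.length_drop]
              omega
            · rw [cond5_iff]
              exact hcond
          rw [if_neg hc5]
        · -- non-wrap case
          have ht1le : t1 ≤ text.toList.length - (p + 1) := by
            have := tw_len_le (· == '=') (text.toList.drop (p + 1))
            simp only [List.length_drop] at this
            omega
          rw [A_neg_nowrap text i (-i).toNat t1 hk2 hk1 hi hbr ht1def (by omega)]
          rw [if_pos hbr]
          by_cases hh : text.toList[p + 1 + t1]? = some '['
          · rw [if_pos hh, if_pos hh]
            have hlt2 : p + 1 + t1 < text.toList.length := by omega
            simp only [Option.some.injEq]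
            omega
          · rw [if_neg hh, if_neg hh]
      · have hgeti : PySem.List.pyGet? text.toList i = some text.toList[p] := by
          rw [hi, PySem.List.pyGet?_neg_natCast text.toList (-i).toNat (by omega) hk2,
            List.getElem?_eq_getElem hp]
        have hA : long_bracket_level_py text i = none := by
          simp only [long_bracket_level_py]
          rw [if_neg (by omega), if_pos (by rw [hgeti]; simp [hbr])]
        rw [hA, if_neg hbr]

theorem main_tight (text : String) (i : Int) (hD : D_long_bracket_level_py text i) :
    long_bracket_level_py text i ≠ long_bracket_level_py_alt text i := by
  obtain ⟨hd1, hd2, hd3, hd4, hd5⟩ := hD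
  have hk1 : 1 ≤ (-i).toNat := by omega
  have hk2 : (-i).toNat ≤ text.toList.length := by omega
  have hi : i = -(((-i).toNat : Nat) : Int) := by omega
  set p := text.toList.length - (-i).toNat with hpdef
  have hptn : ((text.toList.length : Int) + i).toNat = p := by omega
  rw [hptn] at hd3 hd4
  have hp : p < text.toList.length := by
    by_contra hge
    rw [List.getElem?_eq_none (by omega)] at hd3
    simp at hd3
  have hbr : text.toList[p] = '[' := by
    rw [List.getElem?_eq_getElem hp] at hd3
    injection hd3
  set t1 := ((text.toList.drop (p + 1)).takeWhile (· == '=')).length with ht1def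
  have h4 : p + 1 + t1 = text.toList.length := by
    rw [all_iff_tw] at hd4
    simp only [List.length_drop] at hd4
    omega
  have hs : PySem.List.slice text.toList (some i) none = text.toList.drop p := by
    have hs' := PySem.List.slice_from_neg_natCast text.toList (-i).toNat (by omega)
    rw [← hi] at hs'
    exact hs'
  have hB : long_bracket_level_py_alt text i = none := by
    rw [B_drop text i p t1 hs hp ht1def]
    rw [if_pos hbr, if_neg (by rw [List.getElem?_eq_none (by omega)]; simp)]
  have hA : long_bracket_level_py text i
      = some (((text.toList.takeWhile (· == '=')).length : Int) - i - 1) := by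
    rw [A_wrap text i (-i).toNat hk1 hk2 hi hbr (by omega)]
    rw [if_pos ((cond5_iff text.toList).mp hd5)]
  rw [hA, hB]
  simp

-- ===== VERDICT (by name: the statement is the Claim_ definition above) =====
theorem long_bracket_level_py_spec : Claim_unchanged_long_bracket_level_py := by
  intro text i _ hPre
  unfold Spec_long_bracket_level_py
  intro hD
  exact main_unchanged text i hPre hD

theorem long_bracket_level_py_changed : Claim_changed_long_bracket_level_py := by
  unfold Claim_changed_long_bracket_level_py
  refine ⟨by decide, by decide, by decide, ?_, by decide, by decide⟩
  show long_bracket_level_py "[=[" (-1) = some 0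
  simp [long_bracket_level_py, lblScanA]
  decide

theorem long_bracket_level_py_tight : Claim_exact_long_bracket_level_py := by
  intro text i _ _ hD
  exact main_tight text i hD
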